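-- pv_equiv track=rewrite | github.com/UlisesFox/SugeridorDeRecetas | ProyectIoT/ReaderCode/iasola.py | generar_combinaciones
-- ===== SOURCE A (Python) =====
-- from itertools import combinations
--
-- def generar_combinaciones(ids, max_comb_size=3):
--     combs = []
--     sums = []
--     for i in range(1, max_comb_size + 1):
--         for comb in combinations(ids, i):
--             combs.append(comb)
--             sums.append(sum(comb))
--     return combs, sums
-- ===== SOURCE B (Python) =====
-- def generar_combinaciones(ids, max_comb_size=3):
--     ids = list(ids)
--     n = len(ids)
--     combs = []
--     sums = []
--     # level: list of (last_index, tuple, running_sum), one per combination of the current size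
--     level = [(j, (ids[j],), ids[j]) for j in range(n)]
--     size = 1
--     while size <= max_comb_size and level:
--         for _, t, s in level:
--             combs.append(t)
--             sums.append(s)
--         nxt = []
--         for j, t, s in level:
--             for k in range(j + 1, n):
--                 nxt.append((k, t + (ids[k],), s + ids[k]))
--         level = nxt
--         size += 1
--     return combs, sums
-- ===== Notes on version B (the rewrite author's own statement) =====
-- stated objective: alternative
-- what changed: Replaces the per-size itertools.combinations enumeration with repeated sum() by a level-by-level extension: each combination carries its last index and running sum and is extended with strictly later elements, and the size loop stops as soon as a level becomes empty.
import Mathlib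
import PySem

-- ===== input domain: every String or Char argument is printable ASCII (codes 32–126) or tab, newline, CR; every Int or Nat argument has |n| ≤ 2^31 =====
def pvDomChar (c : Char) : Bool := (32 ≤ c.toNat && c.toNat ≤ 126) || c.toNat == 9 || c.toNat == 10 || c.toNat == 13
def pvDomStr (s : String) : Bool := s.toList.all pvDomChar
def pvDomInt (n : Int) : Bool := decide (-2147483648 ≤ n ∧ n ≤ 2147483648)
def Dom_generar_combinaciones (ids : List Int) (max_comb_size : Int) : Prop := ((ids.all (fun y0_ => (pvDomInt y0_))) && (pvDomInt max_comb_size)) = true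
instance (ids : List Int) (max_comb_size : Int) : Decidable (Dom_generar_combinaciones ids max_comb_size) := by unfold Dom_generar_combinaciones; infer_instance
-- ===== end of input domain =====

-- B builds combinations level by level, extending each tuple (with its last index and running sum)
-- by strictly later elements, instead of calling combinations(ids, i) and re-summing each tuple.


-- ===== PORT A =====
-- itertools.combinations(xs, r) in its lexicographic order (exact port of the library call)
def pyCombos : List Int → Nat → List (List Int)
  | _, 0 => [[]]
  | [], _ + 1 => []
  | x :: xs, n + 1 => (pyCombos xs n).map (fun c => x :: c) ++ pyCombos xs (n + 1)

-- Python's sum(): left fold from 0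
def pySum (c : List Int) : Int := c.foldl (· + ·) 0

def generar_combinaciones (ids : List Int) (max_comb_size : Int) : List (List Int) × List Int :=
  (PySem.List.pyRange 1 (max_comb_size + 1) 1).foldl
    (fun acc i =>
      (pyCombos ids i.toNat).foldl
        (fun acc c => (acc.1 ++ [c], acc.2 ++ [pySum c])) acc)
    ([], [])

-- ===== PORT B =====
-- level 1: [(j, (ids[j],), ids[j]) for j in range(n)]   (j < n, so getD is exact for ids[j])
def altInitLevel (ids : List Int) : List (Nat × List Int × Int) :=
  (List.range ids.length).map (fun j => (j, ([ids.getD j 0], ids.getD j 0)))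

-- nxt: for (j, t, s) in level: for k in range(j+1, n): append (k, t + (ids[k],), s + ids[k])
def altExtend (ids : List Int) (level : List (Nat × List Int × Int)) :
    List (Nat × List Int × Int) :=
  level.flatMap (fun e =>
    ((List.range ids.length).drop (e.1 + 1)).map
      (fun k => (k, (e.2.1 ++ [ids.getD k 0], e.2.2 + ids.getD k 0))))

-- while size <= max_comb_size and level: emit the level, then extend it
def altLoop (ids : List Int) :
    Nat → List (Nat × List Int × Int) → List (List Int) × List Int → List (List Int) × List Int
  | 0, _, acc => acc
  | fuel + 1, level, acc =>
    if level.isEmpty then acc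
    else
      altLoop ids fuel (altExtend ids level)
        (level.foldl (fun acc e => (acc.1 ++ [e.2.1], acc.2 ++ [e.2.2])) acc)

def generar_combinaciones_alt (ids : List Int) (max_comb_size : Int) : List (List Int) × List Int :=
  altLoop ids max_comb_size.toNat (altInitLevel ids) ([], [])

-- ===== PRECONDITION & SPEC =====
def Spec_generar_combinaciones (ids : List Int) (max_comb_size : Int) (out : List (List Int) × List Int) : Prop := out = generar_combinaciones_alt ids max_comb_size
instance (ids : List Int) (max_comb_size : Int) (out : List (List Int) × List Int) : Decidable (Spec_generar_combinaciones ids max_comb_size out) := by unfold Spec_generar_combinaciones; infer_instance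

-- ===== CLAIM (what is proved, stated in full; the proofs are below) =====
def Claim_equal_generar_combinaciones : Prop := ∀ (ids : List Int) (max_comb_size : Int), Dom_generar_combinaciones ids max_comb_size → Spec_generar_combinaciones ids max_comb_size (generar_combinaciones ids max_comb_size)

-- ===== LEMMAS AND PROOFS =====

-- canonical level: size-(first arg) combinations using indices ≥ st, with last index and sum
def cL (ids : List Int) : Nat → Nat → List (Nat × List Int × Int)
  | 0, _ => []
  | 1, st => ((List.range ids.length).drop st).map (fun j => (j, ([ids.getD j 0], ids.getD j 0)))
  | m + 2, st =>
    ((List.range ids.length).drop st).flatMap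
      (fun j => (cL ids (m + 1) (j + 1)).map
        (fun e => (e.1, (ids.getD j 0 :: e.2.1, ids.getD j 0 + e.2.2))))

-- A's two nested loops, size by size, as a recursion on the number of remaining sizes
def aRun (ids : List Int) : Nat → Nat → List (List Int) × List Int → List (List Int) × List Int
  | 0, _, acc => acc
  | m + 1, k, acc =>
    aRun ids m (k + 1) (acc.1 ++ pyCombos ids k, acc.2 ++ (pyCombos ids k).map pySum)

theorem foldl_pair_emit :
    ∀ (L : List (Nat × List Int × Int)) (a : List (List Int)) (b : List Int),
      L.foldl (fun acc e => (acc.1 ++ [e.2.1], acc.2 ++ [e.2.2])) (a, b) =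
        (a ++ L.map (fun e => e.2.1), b ++ L.map (fun e => e.2.2)) := by
  intro L
  induction L with
  | nil => simp
  | cons x L ih => intro a b; simp [ih, List.append_assoc]

theorem foldl_pair_comb :
    ∀ (L : List (List Int)) (a : List (List Int)) (b : List Int),
      L.foldl (fun acc c => (acc.1 ++ [c], acc.2 ++ [pySum c])) (a, b) =
        (a ++ L, b ++ L.map pySum) := by
  intro L
  induction L with
  | nil => simp
  | cons x L ih => intro a b; simp [ih, List.append_assoc]

theorem pyCombos_one : ∀ xs : List Int, pyCombos xs 1 = xs.map (fun x => [x]) := by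
  intro xs
  induction xs with
  | nil => rfl
  | cons x xs ih => simp [pyCombos, ih]

theorem pyCombos_nil_of_lt : ∀ (xs : List Int) (k : Nat), xs.length < k → pyCombos xs k = [] := by
  intro xs
  induction xs with
  | nil => intro k h; cases k with | zero => omega | succ k => rfl
  | cons x xs ih =>
    intro k h
    cases k with
    | zero => omega
    | succ k =>
      simp at h
      simp [pyCombos, ih k (by omega), ih (k + 1) (by omega)]

theorem pyCombos_ne_nil : ∀ (xs : List Int) (k : Nat), k ≤ xs.length → pyCombos xs k ≠ [] := by
  intro xs
  induction xs with
  | nil => intro k h; simp at h; subst h; simp [pyCombos]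
  | cons x xs ih =>
    intro k h
    cases k with
    | zero => simp [pyCombos]
    | succ k =>
      simp at h
      simp [pyCombos]
      intro h1 _
      exact ih k h h1

theorem pySum_eq_sum (c : List Int) : pySum c = c.sum := by
  have h := PySem.List.foldl_add c (fun x => x) 0
  simpa [pySum] using h

theorem mapg_drop (ids : List Int) (st : Nat) :
    ((List.range ids.length).drop st).map (fun j => ids.getD j 0) = ids.drop st := by
  rw [List.map_drop]
  congr 1
  apply List.ext_getElem (by simp)
  intro i h1 h2
  simp [List.getD, List.getElem?_eq_getElem h2]

theorem drop_range_cons {n st : Nat} (h : st < n) :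
    (List.range n).drop st = st :: (List.range n).drop (st + 1) := by
  rw [List.drop_eq_getElem_cons (by simpa using h)]
  simp

theorem drop_ids_cons (ids : List Int) {st : Nat} (h : st < ids.length) :
    ids.drop st = ids.getD st 0 :: ids.drop (st + 1) := by
  rw [List.drop_eq_getElem_cons h]
  simp [List.getD, List.getElem?_eq_getElem h]

theorem altExtend_map (ids : List Int) (x : Int) (L : List (Nat × List Int × Int)) :
    altExtend ids (L.map (fun e => (e.1, (x :: e.2.1, x + e.2.2)))) =
      (altExtend ids L).map (fun e => (e.1, (x :: e.2.1, x + e.2.2))) := by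
  simp [altExtend, List.flatMap_map, List.map_flatMap, List.map_map, add_assoc, Function.comp_def]

theorem altExtend_flatMap (ids : List Int) (l : List Nat)
    (F : Nat → List (Nat × List Int × Int)) :
    altExtend ids (l.flatMap F) = l.flatMap (fun a => altExtend ids (F a)) := by
  simp [altExtend, List.flatMap_assoc]

theorem cL_extend (ids : List Int) :
    ∀ (m st : Nat), altExtend ids (cL ids (m + 1) st) = cL ids (m + 2) st := by
  intro m
  induction m with
  | zero =>
    intro st
    simp only [cL, altExtend]
    rw [List.flatMap_map]
    simp [List.map_map, Function.comp_def]
  | succ m ih =>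
    intro st
    conv_lhs => rw [show cL ids (m + 1 + 1) st = ((List.range ids.length).drop st).flatMap
      (fun j => (cL ids (m + 1) (j + 1)).map
        (fun e => (e.1, (ids.getD j 0 :: e.2.1, ids.getD j 0 + e.2.2)))) from by simp [cL]]
    rw [altExtend_flatMap]
    simp only [altExtend_map, ih]
    conv_rhs => rw [show cL ids (m + 1 + 2) st = ((List.range ids.length).drop st).flatMap
      (fun j => (cL ids (m + 2) (j + 1)).map
        (fun e => (e.1, (ids.getD j 0 :: e.2.1, ids.getD j 0 + e.2.2)))) from by simp [cL]]

theorem cL_combos (ids : List Int) :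
    ∀ (m st : Nat), (cL ids (m + 1) st).map (fun e => e.2.1) = pyCombos (ids.drop st) (m + 1) := by
  intro m
  induction m with
  | zero =>
    intro st
    rw [pyCombos_one, ← mapg_drop ids st]
    simp [cL, List.map_map, Function.comp_def]
  | succ m ih =>
    have key : ∀ (d st : Nat), ids.length ≤ st + d →
        (cL ids (m + 2) st).map (fun e => e.2.1) = pyCombos (ids.drop st) (m + 2) := by
      intro d
      induction d with
      | zero =>
        intro st h
        have hr : (List.range ids.length).drop st = [] :=
          List.drop_eq_nil_of_le (by simp; omega)
        have hi : ids.drop st = [] := List.drop_eq_nil_of_le (by omega)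
        simp [cL, hr, hi, pyCombos]
      | succ d ihd =>
        intro st h
        by_cases hst : ids.length ≤ st
        · have hr : (List.range ids.length).drop st = [] :=
            List.drop_eq_nil_of_le (by simp; omega)
          have hi : ids.drop st = [] := List.drop_eq_nil_of_le hst
          simp [cL, hr, hi, pyCombos]
        · push Not at hst
          have h1 : cL ids (m + 2) st =
              (cL ids (m + 1) (st + 1)).map
                (fun e => (e.1, (ids.getD st 0 :: e.2.1, ids.getD st 0 + e.2.2)))
              ++ cL ids (m + 2) (st + 1) := by
            conv_lhs => rw [show cL ids (m + 2) st = ((List.range ids.length).drop st).flatMap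
              (fun j => (cL ids (m + 1) (j + 1)).map
                (fun e => (e.1, (ids.getD j 0 :: e.2.1, ids.getD j 0 + e.2.2)))) from by simp [cL]]
            rw [drop_range_cons hst, List.flatMap_cons]
            simp [cL]
          rw [h1, List.map_append, List.map_map, drop_ids_cons ids hst]
          rw [show pyCombos (ids.getD st 0 :: ids.drop (st + 1)) (m + 2) =
              (pyCombos (ids.drop (st + 1)) (m + 1)).map (fun c => ids.getD st 0 :: c)
              ++ pyCombos (ids.drop (st + 1)) (m + 2) from rfl]
          rw [ihd (st + 1) (by omega), ← ih (st + 1), List.map_map]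
          rfl
    intro st
    exact key ids.length st (by omega)

theorem cL_sums (ids : List Int) :
    ∀ (m st : Nat) (e : Nat × List Int × Int), e ∈ cL ids (m + 1) st → e.2.2 = pySum e.2.1 := by
  intro m
  induction m with
  | zero =>
    intro st e he
    simp only [cL] at he
    rw [List.map_drop] at he
    have he2 := List.mem_of_mem_drop he
    simp only [List.mem_map] at he2
    obtain ⟨j, _, rfl⟩ := he2
    simp [pySum]
  | succ m ih =>
    intro st e he
    rw [show cL ids (m + 1 + 1) st = ((List.range ids.length).drop st).flatMap
      (fun j => (cL ids (m + 1) (j + 1)).map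
        (fun e => (e.1, (ids.getD j 0 :: e.2.1, ids.getD j 0 + e.2.2)))) from by simp [cL]] at he
    simp only [List.mem_flatMap, List.mem_map] at he
    obtain ⟨j, _, e', he', rfl⟩ := he
    have hs := ih (j + 1) e' he'
    simp only [pySum_eq_sum] at hs ⊢
    simp [hs]

theorem aRun_nil (ids : List Int) :
    ∀ (m k : Nat) (acc : List (List Int) × List Int), ids.length < k → aRun ids m k acc = acc := by
  intro m
  induction m with
  | zero => intro k acc _; rfl
  | succ m ih =>
    intro k acc h
    simp [aRun, pyCombos_nil_of_lt ids k h]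
    exact ih (k + 1) acc (by omega)

theorem altLoop_eq_aRun (ids : List Int) :
    ∀ (m k : Nat) (acc : List (List Int) × List Int), 1 ≤ k →
      altLoop ids m (cL ids k 0) acc = aRun ids m k acc := by
  intro m
  induction m with
  | zero => intro k acc _; rfl
  | succ m ih =>
    intro k acc hk
    obtain ⟨k', rfl⟩ : ∃ k', k = k' + 1 := ⟨k - 1, by omega⟩
    obtain ⟨a, b⟩ := acc
    have hcombs := cL_combos ids k' 0
    rw [List.drop_zero] at hcombs
    by_cases hnil : cL ids (k' + 1) 0 = []
    · have hc : pyCombos ids (k' + 1) = [] := by rw [← hcombs, hnil]; rfl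
      have hlen : ids.length < k' + 1 := by
        by_contra hl
        exact pyCombos_ne_nil ids (k' + 1) (by omega) hc
      rw [aRun_nil ids (m + 1) (k' + 1) (a, b) hlen]
      simp [altLoop, hnil]
    · have hsums : (cL ids (k' + 1) 0).map (fun e => e.2.2) =
          (pyCombos ids (k' + 1)).map pySum := by
        rw [← hcombs, List.map_map]
        exact List.map_eq_map_iff.mpr (fun e he => cL_sums ids k' 0 e he)
      rw [show altLoop ids (m + 1) (cL ids (k' + 1) 0) (a, b) =
          altLoop ids m (altExtend ids (cL ids (k' + 1) 0))
            ((cL ids (k' + 1) 0).foldl (fun acc e => (acc.1 ++ [e.2.1], acc.2 ++ [e.2.2])) (a, b))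
          from by simp [altLoop, List.isEmpty_iff, hnil]]
      rw [foldl_pair_emit, hcombs, hsums]
      rw [cL_extend ids k' 0]
      rw [show aRun ids (m + 1) (k' + 1) (a, b) =
          aRun ids m (k' + 2) (a ++ pyCombos ids (k' + 1), b ++ (pyCombos ids (k' + 1)).map pySum)
          from rfl]
      exact ih (k' + 2) _ (by omega)

theorem a_fold (ids : List Int) :
    ∀ (m k : Nat) (acc : List (List Int) × List Int),
      (PySem.List.pyRange ((k : Int) + 1) (((k : Int) + 1) + (m : Int)) 1).foldl
        (fun acc i => (pyCombos ids i.toNat).foldl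
          (fun acc c => (acc.1 ++ [c], acc.2 ++ [pySum c])) acc) acc
      = aRun ids m (k + 1) acc := by
  intro m
  induction m with
  | zero =>
    intro k acc
    rw [PySem.List.pyRange_one_eq_nil (by omega)]
    rfl
  | succ m ih =>
    intro k acc
    obtain ⟨a, b⟩ := acc
    rw [PySem.List.pyRange_one_cons (by push_cast; omega), List.foldl_cons]
    rw [foldl_pair_comb]
    have ht : ((k : Int) + 1).toNat = k + 1 := by omega
    have hr : PySem.List.pyRange ((k : Int) + 1 + 1) ((k : Int) + 1 + ((m : Nat) + 1 : Nat)) 1 =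
        PySem.List.pyRange (((k + 1 : Nat) : Int) + 1) ((((k + 1 : Nat) : Int) + 1) + (m : Int)) 1 := by
      congr 1 <;> push_cast <;> ring
    rw [hr, ht, ih (k + 1) _]
    rw [show aRun ids (m + 1) (k + 1) (a, b) =
        aRun ids m (k + 2) (a ++ pyCombos ids (k + 1), b ++ (pyCombos ids (k + 1)).map pySum)
        from rfl]

theorem a_eq_aRun (ids : List Int) :
    ∀ (M : Int), generar_combinaciones ids M = aRun ids M.toNat 1 ([], []) := by
  intro M
  unfold generar_combinaciones
  by_cases hM : M ≤ 0
  · rw [PySem.List.pyRange_one_eq_nil (by omega)]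
    rw [show M.toNat = 0 by omega]
    rfl
  · have h4 := a_fold ids M.toNat 0 ([], [])
    have e1 : ((0 : Nat) : Int) + 1 = 1 := by norm_num
    rw [e1] at h4
    have e2 : (1 : Int) + (M.toNat : Int) = M + 1 := by omega
    rw [e2] at h4
    simpa using h4

theorem altInit_eq_cL (ids : List Int) : altInitLevel ids = cL ids 1 0 := by
  simp [altInitLevel, cL]

-- ===== VERDICT (by name: the statement is the Claim_ definition above) =====
theorem generar_combinaciones_spec : Claim_equal_generar_combinaciones := by
  intro ids M _
  unfold Spec_generar_combinaciones generar_combinaciones_alt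
  rw [a_eq_aRun ids M, altInit_eq_cL, altLoop_eq_aRun ids M.toNat 1 ([], []) (by omega)]
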